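-- pv_equiv track=rewrite | github.com/Seljelid/aoc2024 | src/2.py | _classify_report
-- ===== SOURCE A (Python) =====
-- def _classify_report(report: list) -> str:
--     diffs = [j - i for i, j in zip(report[:-1], report[1:])]
--     if all(x in (-1, -2, -3) for x in diffs):
--         return "decreasing"
--     elif all(x in (1, 2, 3) for x in diffs):
--         return "increasing"
--     else:
--         return "neither"
-- ===== SOURCE B (Python) =====
-- def _within(prev, rest, lo, hi):
--     for x in rest:
--         d = x - prev
--         if not (lo <= d <= hi):
--             return False
--         prev = x
--     return True
--
--
-- def _classify_report(report: list) -> str: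
--     if len(report) < 2:
--         return "decreasing"
--     d = report[1] - report[0]
--     if -3 <= d <= -1:
--         return "decreasing" if _within(report[1], report[2:], -3, -1) else "neither"
--     if 1 <= d <= 3:
--         return "increasing" if _within(report[1], report[2:], 1, 3) else "neither"
--     return "neither"
-- ===== Notes on version B (the rewrite author's own statement) =====
-- stated objective: alternative
-- what changed: Branches on the first adjacent difference to commit to one direction, then verifies only that direction with a single early-exit range-check scan, instead of building a diffs list and running two full all() membership scans; correct because the two difference sets are disjoint, so a first diff in one range rules out the other verdict.
import Mathlib
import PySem

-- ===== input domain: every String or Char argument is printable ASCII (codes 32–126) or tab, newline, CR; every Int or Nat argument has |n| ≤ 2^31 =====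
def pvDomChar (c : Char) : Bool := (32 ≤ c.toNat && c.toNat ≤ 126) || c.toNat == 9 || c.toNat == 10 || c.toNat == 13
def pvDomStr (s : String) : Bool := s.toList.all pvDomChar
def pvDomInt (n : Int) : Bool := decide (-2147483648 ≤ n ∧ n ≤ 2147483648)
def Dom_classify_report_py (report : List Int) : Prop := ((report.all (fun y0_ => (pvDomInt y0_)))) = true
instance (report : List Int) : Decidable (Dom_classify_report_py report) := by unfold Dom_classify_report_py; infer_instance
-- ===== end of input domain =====

-- B commits to one direction from the first adjacent difference and verifies only that
-- direction with a single early-exit range-check scan, instead of A's diffs list with two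
-- full membership scans (alternative algorithm, same asymptotic cost).

-- ===== PORT A =====
def classify_report_py (report : List Int) : String :=
  let diffs := (List.zip (PySem.List.slice report none (some (-1))) (PySem.List.slice report (some 1) none)).map
    (fun p => p.2 - p.1)
  if diffs.all (fun x => decide (x = -1 ∨ x = -2 ∨ x = -3)) then "decreasing"
  else if diffs.all (fun x => decide (x = 1 ∨ x = 2 ∨ x = 3)) then "increasing"
  else "neither"

-- ===== PORT B =====
-- _within(prev, rest, lo, hi): early-exit scan checking each adjacent diff lies in [lo, hi]
def pvWithin (prev : Int) (rest : List Int) (lo hi : Int) : Bool :=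
  match rest with
  | [] => true
  | x :: t => if lo ≤ x - prev ∧ x - prev ≤ hi then pvWithin x t lo hi else false

def classify_report_py_alt (report : List Int) : String :=
  match report with
  | [] => "decreasing"
  | [_] => "decreasing"
  | a :: b :: t =>
    let d := b - a
    if -3 ≤ d ∧ d ≤ -1 then (if pvWithin b t (-3) (-1) then "decreasing" else "neither")
    else if 1 ≤ d ∧ d ≤ 3 then (if pvWithin b t 1 3 then "increasing" else "neither")
    else "neither"

-- ===== PRECONDITION & SPEC =====
def Spec_classify_report_py (report : List Int) (out : String) : Prop := out = classify_report_py_alt report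
instance (report : List Int) (out : String) : Decidable (Spec_classify_report_py report out) := by unfold Spec_classify_report_py; infer_instance

-- ===== CLAIM (what is proved, stated in full; the proofs are below) =====
def Claim_equal_classify_report_py : Prop := ∀ (report : List Int), Dom_classify_report_py report → Spec_classify_report_py report (classify_report_py report)

-- ===== LEMMAS AND PROOFS =====

-- zip with the first list truncated by dropLast equals zip with the full first list
theorem pv_zip_dropLast (l : List Int) :
    List.zip l.dropLast (l.drop 1) = List.zip l (l.drop 1) := by
  induction l with
  | nil => rfl
  | cons a t ih =>
    cases t with
    | nil => rfl
    | cons b u =>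
      have ih' := ih
      simp only [List.drop_succ_cons, List.drop_zero] at ih'
      rw [show (a::b::u).dropLast = a :: (b::u).dropLast from rfl]
      simp only [List.drop_succ_cons, List.drop_zero, List.zip_cons_cons, ih']

-- the early-exit range scan computes the all-scan over adjacent pairs
theorem pv_within_eq_all (rest : List Int) (prev lo hi : Int) :
    pvWithin prev rest lo hi
      = (List.zip (prev :: rest) rest).all (fun p => decide (lo ≤ p.2 - p.1 ∧ p.2 - p.1 ≤ hi)) := by
  induction rest generalizing prev with
  | nil => rfl
  | cons x t ih =>
    show (if lo ≤ x - prev ∧ x - prev ≤ hi then pvWithin x t lo hi else false) = _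
    by_cases h : lo ≤ x - prev ∧ x - prev ≤ hi
    · rw [if_pos h, ih, List.zip_cons_cons, List.all_cons, decide_eq_true h, Bool.true_and]
    · rw [if_neg h, List.zip_cons_cons, List.all_cons, decide_eq_false h, Bool.false_and]

-- ===== VERDICT (by name: the statement is the Claim_ definition above) =====
theorem classify_report_py_spec : Claim_equal_classify_report_py := by
  intro report _
  unfold Spec_classify_report_py classify_report_py classify_report_py_alt
  simp only [PySem.List.slice_to_neg_one, PySem.List.slice_from_one, ← List.drop_one]
  rw [pv_zip_dropLast]
  match report with
  | [] => rfl
  | [_] => rfl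
  | a :: b :: t =>
    simp only [List.drop_one, List.tail_cons, List.zip_cons_cons, List.map_cons, List.all_cons,
      pv_within_eq_all, List.all_map, Function.comp_def]
    have halld : ((b :: t).zip t).all (fun p => decide (p.2 - p.1 = -1 ∨ p.2 - p.1 = -2 ∨ p.2 - p.1 = -3))
        = ((b :: t).zip t).all (fun p => decide (-3 ≤ p.2 - p.1 ∧ p.2 - p.1 ≤ -1)) := by
      congr 1; funext p; simp only [decide_eq_decide]; omega
    have halli : ((b :: t).zip t).all (fun p => decide (p.2 - p.1 = 1 ∨ p.2 - p.1 = 2 ∨ p.2 - p.1 = 3))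
        = ((b :: t).zip t).all (fun p => decide (1 ≤ p.2 - p.1 ∧ p.2 - p.1 ≤ 3)) := by
      congr 1; funext p; simp only [decide_eq_decide]; omega
    by_cases hdec : -3 ≤ b - a ∧ b - a ≤ -1 <;> by_cases hinc : 1 ≤ b - a ∧ b - a ≤ 3
    · omega
    · have h1 : (b - a = -1 ∨ b - a = -2 ∨ b - a = -3) := by omega
      have h2 : ¬ (b - a = 1 ∨ b - a = 2 ∨ b - a = 3) := by omega
      rw [decide_eq_true h1, decide_eq_false h2]
      simp only [Bool.true_and, Bool.false_and, Bool.false_eq_true, if_false]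
      rw [if_pos hdec, halld]
    · have h1 : ¬ (b - a = -1 ∨ b - a = -2 ∨ b - a = -3) := by omega
      have h2 : (b - a = 1 ∨ b - a = 2 ∨ b - a = 3) := by omega
      rw [decide_eq_false h1, decide_eq_true h2]
      simp only [Bool.true_and, Bool.false_and, Bool.false_eq_true, if_false]
      rw [if_neg hdec, if_pos hinc, halli]
    · have h1 : ¬ (b - a = -1 ∨ b - a = -2 ∨ b - a = -3) := by omega
      have h2 : ¬ (b - a = 1 ∨ b - a = 2 ∨ b - a = 3) := by omega
      rw [decide_eq_false h1, decide_eq_false h2]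
      simp only [Bool.false_and, Bool.false_eq_true, if_false]
      rw [if_neg hdec, if_neg hinc]
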